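-- pv_equiv track=rewrite | github.com/che-shr-cat/tocs | analysis/log_analysis.py | _match_invariants_relaxed
-- ===== SOURCE A (Python) =====
-- def _strip_path(p: str) -> str:
--     if not p:
--         return ""
--     parts = p.replace("\\", "/").split("/")
--     if len(parts) > 1:
--         return "/".join(parts[1:])
--     return p
--
-- def _normalise_relaxed(s: dict | None) -> tuple:
--     if s is None:
--         return ()
--     stype = s.get("type", "")
--     src = _strip_path(s.get("src") or "")
--     dst = _strip_path(s.get("dst") or "")
--     via = _strip_path(s.get("via") or "")
--     if stype == "INTERFACE_ONLY":
--         if not dst and via: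
--             dst = via
--     return (stype, src, dst)
--
-- def _relaxed_match(pred: tuple, gt: tuple) -> bool:
--     if len(pred) != 3 or len(gt) != 3:
--         return False
--     p_type, p_src, p_dst = pred
--     g_type, g_src, g_dst = gt
--     if p_type != g_type:
--         return False
--     if g_src and g_src != p_src:
--         return False
--     if g_dst and g_dst != p_dst:
--         return False
--     return True
--
-- def _match_invariants_relaxed(
--     pred_invs: list[dict], gt_invs: list[dict]
-- ) -> list[tuple[dict, dict | None, bool]]:
--     """Match predicted invariants against GT using relaxed matching.
--
--     Returns list of (pred_inv, matched_gt_inv_or_None, is_matched).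
--     """
--     gt_tuples = []
--     for inv in gt_invs:
--         gt_tuples.append(_normalise_relaxed(inv.get("structured")))
--
--     matched_gt: set[int] = set()
--     results = []
--     for pred in pred_invs:
--         structured = pred.get("structured")
--         if structured is None:
--             results.append((pred, None, False))
--             continue
--         pt = _normalise_relaxed(structured)
--         found = False
--         for gi, gt_t in enumerate(gt_tuples):
--             if gi not in matched_gt and _relaxed_match(pt, gt_t):
--                 matched_gt.add(gi)
--                 results.append((pred, gt_invs[gi], True))
--                 found = True
--                 break
--         if not found:
--             results.append((pred, None, False))
--     return results
-- ===== SOURCE B (Python) =====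
-- def _strip_path(p: str) -> str:
--     if not p:
--         return ""
--     parts = p.replace("\\", "/").split("/")
--     if len(parts) > 1:
--         return "/".join(parts[1:])
--     return p
--
-- def _normalise_relaxed(s: dict | None) -> tuple:
--     if s is None:
--         return ()
--     stype = s.get("type", "")
--     src = _strip_path(s.get("src") or "")
--     dst = _strip_path(s.get("dst") or "")
--     via = _strip_path(s.get("via") or "")
--     if stype == "INTERFACE_ONLY":
--         if not dst and via:
--             dst = via
--     return (stype, src, dst)
--
-- def _match_invariants_relaxed(pred_invs, gt_invs):
--     # Bucket GT indices by normalised tuple; each pred only probes its <=4 candidate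
--     # buckets and greedily takes the smallest unmatched index via per-bucket cursors.
--     buckets = {}
--     for gi, inv in enumerate(gt_invs):
--         key = _normalise_relaxed(inv.get("structured"))
--         if key:
--             buckets.setdefault(key, []).append(gi)
--     cur = {}
--     results = []
--     for pred in pred_invs:
--         structured = pred.get("structured")
--         if structured is None:
--             results.append((pred, None, False))
--             continue
--         t, src, dst = _normalise_relaxed(structured)
--         best = None
--         best_key = None
--         for key in ((t, src, dst), (t, "", dst), (t, src, ""), (t, "", "")):
--             lst = buckets.get(key)
--             if lst is None:
--                 continue
--             c = cur.get(key, 0)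
--             if c < len(lst) and (best is None or lst[c] < best):
--                 best = lst[c]
--                 best_key = key
--         if best is None:
--             results.append((pred, None, False))
--         else:
--             cur[best_key] = cur.get(best_key, 0) + 1
--             results.append((pred, gt_invs[best], True))
--     return results
-- ===== Notes on version B (the rewrite author's own statement) =====
-- stated objective: alternative
-- what changed: Instead of rescanning all GT tuples per prediction with a matched-index set, B buckets GT indices by normalised (type,src,dst) tuple once and each prediction probes only its <=4 candidate buckets, taking the smallest unmatched index via per-bucket cursors.
import Mathlib
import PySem

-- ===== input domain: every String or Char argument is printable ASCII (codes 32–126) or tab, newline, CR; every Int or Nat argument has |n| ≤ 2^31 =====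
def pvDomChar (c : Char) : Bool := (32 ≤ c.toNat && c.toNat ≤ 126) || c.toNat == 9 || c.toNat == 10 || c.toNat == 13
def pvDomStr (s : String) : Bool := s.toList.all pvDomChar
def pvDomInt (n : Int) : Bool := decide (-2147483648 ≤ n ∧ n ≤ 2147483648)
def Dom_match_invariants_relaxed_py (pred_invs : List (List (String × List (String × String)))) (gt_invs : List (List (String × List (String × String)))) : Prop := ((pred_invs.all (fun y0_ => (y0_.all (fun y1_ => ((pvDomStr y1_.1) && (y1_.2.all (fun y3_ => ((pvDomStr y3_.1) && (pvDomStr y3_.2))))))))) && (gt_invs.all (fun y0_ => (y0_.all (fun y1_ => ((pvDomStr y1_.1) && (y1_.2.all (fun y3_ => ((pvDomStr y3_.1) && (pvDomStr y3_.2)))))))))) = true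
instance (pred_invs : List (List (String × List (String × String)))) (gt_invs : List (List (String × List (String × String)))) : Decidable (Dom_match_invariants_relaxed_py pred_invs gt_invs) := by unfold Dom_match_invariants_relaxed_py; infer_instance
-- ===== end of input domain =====

-- ===== PORT A =====
-- B is an exact re-implementation that buckets GT indices by normalised tuple so each
-- predicted invariant probes at most 4 candidate buckets instead of rescanning all of GT.

-- shared helpers (_strip_path / _normalise_relaxed are used verbatim by both Pythons)
def pvStripPath (p : String) : String :=
  if p == "" then ""  -- `if not p`
  else
    -- sep "/" is nonempty, so split? is always `some`
    let parts := (PySem.Str.split? (PySem.Str.replace p "\\" "/") "/").getD []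
    if parts.length > 1 then PySem.Str.join "/" (PySem.List.slice parts (some 1) none)
    else p

-- body of _normalise_relaxed for a present dict; `s.get(k) or ""` is get with
-- default "" because "" is the only falsy str
def pvNorm3 (d : List (String × String)) : String × String × String :=
  let stype := (PySem.Dict.mk d).getD "type" ""
  let src := pvStripPath ((PySem.Dict.mk d).getD "src" "")
  let dst := pvStripPath ((PySem.Dict.mk d).getD "dst" "")
  let via := pvStripPath ((PySem.Dict.mk d).getD "via" "")
  let dst := if stype == "INTERFACE_ONLY" && dst == "" && via != "" then via else dst
  (stype, src, dst)

-- _normalise_relaxed; the empty tuple () returned for None is encoded as `none`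
def pvNorm (s : Option (List (String × String))) : Option (String × String × String) :=
  match s with
  | none => none
  | some d => some (pvNorm3 d)

-- _relaxed_match; pred is always a 3-tuple at the call site, gt may be () (= none)
def pvRelMatch (pt : String × String × String) (g : Option (String × String × String)) : Bool :=
  match g with
  | none => false  -- len(gt) != 3
  | some (gt, gs, gd) =>
    if pt.1 != gt then false
    else if gs != "" && gs != pt.2.1 then false
    else if gd != "" && gd != pt.2.2 then false
    else true

-- inner `for gi, gt_t in enumerate(gt_tuples): ... break`
def pvFindA (matched : PySem.Set Nat) (pt : String × String × String) :
    List (Option (String × String × String)) → Nat → Option Nat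
  | [], _ => none
  | g :: rest, gi =>
    if !(PySem.Set.contains matched gi) && pvRelMatch pt g then some gi
    else pvFindA matched pt rest (gi + 1)

-- outer `for pred in pred_invs` loop with state (matched, results)
def pvLoopA (gt_invs : List (List (String × List (String × String))))
    (gts : List (Option (String × String × String))) :
    List (List (String × List (String × String))) → PySem.Set Nat →
    List ((List (String × List (String × String))) × (Option (List (String × List (String × String)))) × Bool) →
    List ((List (String × List (String × String))) × (Option (List (String × List (String × String)))) × Bool)
  | [], _, acc => acc
  | pred :: rest, matched, acc =>
    match (PySem.Dict.mk pred).get? "structured" with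
    | none => pvLoopA gt_invs gts rest matched (acc ++ [(pred, none, false)])
    | some st =>
      match pvFindA matched (pvNorm3 st) gts 0 with
      | some gi =>
        pvLoopA gt_invs gts rest (PySem.Set.add matched gi)
          (acc ++ [(pred, PySem.List.pyGet? gt_invs (gi : Int), true)])
      | none => pvLoopA gt_invs gts rest matched (acc ++ [(pred, none, false)])

def match_invariants_relaxed_py (pred_invs : List (List (String × List (String × String)))) (gt_invs : List (List (String × List (String × String)))) : List ((List (String × List (String × String))) × (Option (List (String × List (String × String)))) × Bool) :=
  let gts := gt_invs.foldl
    (fun acc inv => acc ++ [pvNorm ((PySem.Dict.mk inv).get? "structured")]) []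
  pvLoopA gt_invs gts pred_invs PySem.Set.empty []

-- ===== PORT B =====
-- first loop of B: buckets.setdefault(key, []).append(gi)
def pvBucketsGo : List (List (String × List (String × String))) → Nat →
    PySem.Dict (String × String × String) (List Nat) →
    PySem.Dict (String × String × String) (List Nat)
  | [], _, b => b
  | inv :: rest, gi, b =>
    match pvNorm ((PySem.Dict.mk inv).get? "structured") with
    | none => pvBucketsGo rest (gi + 1) b
    | some k => pvBucketsGo rest (gi + 1) (b.insert k (b.getD k [] ++ [gi]))

-- body of B's `for key in (...)` candidate loop (state = (best, best_key) as an Option pair)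
def pvStepB (buckets : PySem.Dict (String × String × String) (List Nat))
    (cur : PySem.Dict (String × String × String) Nat)
    (best : Option (Nat × (String × String × String))) (k : String × String × String) :
    Option (Nat × (String × String × String)) :=
  match buckets.get? k with
  | none => best  -- `if lst is None: continue`
  | some lst =>
    let c := cur.getD k 0
    if c < lst.length then
      match PySem.List.pyGet? lst (c : Int) with  -- lst[c]; in range by the guard
      | none => best
      | some v =>
        match best with
        | none => some (v, k)
        | some (b, bk) => if v < b then some (v, k) else some (b, bk)
    else best

def pvCands (pt : String × String × String) : List (String × String × String) :=
  [pt, (pt.1, "", pt.2.2), (pt.1, pt.2.1, ""), (pt.1, "", "")]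

-- B's `for pred in pred_invs` loop with state (cur, results)
def pvLoopB (gt_invs : List (List (String × List (String × String))))
    (buckets : PySem.Dict (String × String × String) (List Nat)) :
    List (List (String × List (String × String))) →
    PySem.Dict (String × String × String) Nat →
    List ((List (String × List (String × String))) × (Option (List (String × List (String × String)))) × Bool) →
    List ((List (String × List (String × String))) × (Option (List (String × List (String × String)))) × Bool)
  | [], _, acc => acc
  | pred :: rest, cur, acc =>
    match (PySem.Dict.mk pred).get? "structured" with
    | none => pvLoopB gt_invs buckets rest cur (acc ++ [(pred, none, false)])
    | some st =>
      match (pvCands (pvNorm3 st)).foldl (pvStepB buckets cur) none with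
      | none => pvLoopB gt_invs buckets rest cur (acc ++ [(pred, none, false)])
      | some (best, bk) =>
        pvLoopB gt_invs buckets rest (cur.insert bk (cur.getD bk 0 + 1))
          (acc ++ [(pred, PySem.List.pyGet? gt_invs (best : Int), true)])

def match_invariants_relaxed_py_alt (pred_invs : List (List (String × List (String × String)))) (gt_invs : List (List (String × List (String × String)))) : List ((List (String × List (String × String))) × (Option (List (String × List (String × String)))) × Bool) :=
  let buckets := pvBucketsGo gt_invs 0 PySem.Dict.empty
  pvLoopB gt_invs buckets pred_invs PySem.Dict.empty []

-- ===== PRECONDITION & SPEC =====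
-- explicit DecidableEq for the result type (automatic synthesis hits the size limit)
def pvDecEq1 : DecidableEq ((Option (List (String × List (String × String)))) × Bool) :=
  fun a b => instDecidableEqProd a b
def pvDecEqRes : DecidableEq ((List (String × List (String × String))) × (Option (List (String × List (String × String)))) × Bool) :=
  fun a b => @instDecidableEqProd _ _ _ pvDecEq1 a b
def pvDecEqOut : DecidableEq (List ((List (String × List (String × String))) × (Option (List (String × List (String × String)))) × Bool)) :=
  fun a b => @instDecidableEqList _ pvDecEqRes a b

def Spec_match_invariants_relaxed_py (pred_invs : List (List (String × List (String × String)))) (gt_invs : List (List (String × List (String × String)))) (out : List ((List (String × List (String × String))) × (Option (List (String × List (String × String)))) × Bool)) : Prop := out = match_invariants_relaxed_py_alt pred_invs gt_invs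
instance (pred_invs : List (List (String × List (String × String)))) (gt_invs : List (List (String × List (String × String)))) (out : List ((List (String × List (String × String))) × (Option (List (String × List (String × String)))) × Bool)) : Decidable (Spec_match_invariants_relaxed_py pred_invs gt_invs out) := by unfold Spec_match_invariants_relaxed_py; exact pvDecEqOut out (match_invariants_relaxed_py_alt pred_invs gt_invs)

-- ===== CLAIM (what is proved, stated in full; the proofs are below) =====
def Claim_equal_match_invariants_relaxed_py : Prop := ∀ (pred_invs : List (List (String × List (String × String)))) (gt_invs : List (List (String × List (String × String)))), Dom_match_invariants_relaxed_py pred_invs gt_invs → Spec_match_invariants_relaxed_py pred_invs gt_invs (match_invariants_relaxed_py pred_invs gt_invs)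

-- ===== LEMMAS AND PROOFS =====

-- the gt tuple at each index, and the ascending list of gt indices whose tuple is k
def pvG (inv : List (String × List (String × String))) : Option (String × String × String) :=
  pvNorm ((PySem.Dict.mk inv).get? "structured")

def pvIdxs : List (Option (String × String × String)) → Nat → (String × String × String) → List Nat
  | [], _, _ => []
  | g :: rest, i, k => (if g = some k then [i] else []) ++ pvIdxs rest (i + 1) k

-- loop invariant tying A's matched set to B's cursors: in every bucket the first
-- cur-k indices are exactly the matched ones
def pvInv (gts : List (Option (String × String × String)))
    (matched : PySem.Set Nat) (cur : PySem.Dict (String × String × String) Nat) : Prop :=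
  ∀ k : String × String × String,
    (∀ x ∈ (pvIdxs gts 0 k).take (cur.getD k 0), x ∈ matched) ∧
    (∀ x ∈ (pvIdxs gts 0 k).drop (cur.getD k 0), x ∉ matched)

lemma pvIdxs_mem_ge {x : Nat} : ∀ (l : List (Option (String × String × String))) (i : Nat) (k), x ∈ pvIdxs l i k → i ≤ x := by
  intro l
  induction l with
  | nil => intro i k h; simp [pvIdxs] at h
  | cons g rest ih =>
    intro i k h
    simp only [pvIdxs, List.mem_append] at h
    rcases h with h | h
    · split at h <;> simp_all
    · exact Nat.le_of_succ_le (ih (i + 1) k h)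

lemma pvIdxs_sorted : ∀ (l : List (Option (String × String × String))) (i : Nat) (k), (pvIdxs l i k).Pairwise (· < ·) := by
  intro l
  induction l with
  | nil => intro i k; simp [pvIdxs]
  | cons g rest ih =>
    intro i k
    simp only [pvIdxs]
    refine List.pairwise_append.mpr ⟨?_, ih (i + 1) k, ?_⟩
    · split <;> simp
    · intro a ha b hb
      have hb' := pvIdxs_mem_ge rest (i + 1) k hb
      split at ha <;> simp_all

lemma pvIdxs_mem_iff {x : Nat} : ∀ (l : List (Option (String × String × String))) (i : Nat) (k),
    x ∈ pvIdxs l i k ↔ i ≤ x ∧ l[x - i]? = some (some k) := by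
  intro l
  induction l with
  | nil => intro i k; simp [pvIdxs]
  | cons g rest ih =>
    intro i k
    simp only [pvIdxs, List.mem_append, ih]
    constructor
    · rintro (h | ⟨h1, h2⟩)
      · have hx : x = i ∧ g = some k := by split at h <;> simp_all [eq_comm]
        refine ⟨Nat.le_of_eq hx.1.symm, ?_⟩
        simp [hx.1, hx.2]
      · refine ⟨by omega, ?_⟩
        have : x - i = (x - (i + 1)) + 1 := by omega
        simp [this, h2]
    · rintro ⟨h1, h2⟩
      rcases Nat.eq_or_lt_of_le h1 with h | h
      · left; simp [← h] at h2 ⊢; simp [h2]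
      · right
        have : x - i = (x - (i + 1)) + 1 := by omega
        rw [this] at h2
        simp only [List.getElem?_cons_succ] at h2
        exact ⟨by omega, h2⟩

lemma pvIdxs_mem_zero_iff {x : Nat} (gts : List (Option (String × String × String))) (k) :
    x ∈ pvIdxs gts 0 k ↔ gts[x]? = some (some k) := by
  simpa using pvIdxs_mem_iff gts 0 k

lemma pvBucketsGo_getD : ∀ (l : List (List (String × List (String × String)))) (i : Nat)
    (b : PySem.Dict (String × String × String) (List Nat)) (k),
    (pvBucketsGo l i b).getD k [] = b.getD k [] ++ pvIdxs (l.map pvG) i k := by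
  intro l
  induction l with
  | nil => intro i b k; simp [pvBucketsGo, pvIdxs]
  | cons inv rest ih =>
    intro i b k
    simp only [pvBucketsGo, List.map_cons]
    cases h : pvNorm ((PySem.Dict.mk inv).get? "structured") with
    | none =>
      rw [ih]
      simp [pvIdxs, pvG, h]
    | some k' =>
      rw [ih]
      rw [PySem.Dict.getD_insert]
      simp only [pvIdxs, pvG, h]
      by_cases hk : k = k'
      · simp [hk]
      · simp [hk, Ne.symm hk]

-- okA x: A's inner-loop condition holds at index x
def pvOkA (gts : List (Option (String × String × String))) (matched : PySem.Set Nat)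
    (pt : String × String × String) (x : Nat) : Prop :=
  (∃ g, gts[x]? = some g ∧ pvRelMatch pt g = true) ∧ x ∉ matched

lemma pvRelMatch_iff_mem_cands (pt k : String × String × String) :
    pvRelMatch pt (some k) = true ↔ k ∈ pvCands pt := by
  obtain ⟨t, s, d⟩ := pt
  obtain ⟨kt, ks, kd⟩ := k
  simp only [pvRelMatch, pvCands, List.mem_cons, Prod.mk.injEq]
  split_ifs with h1 h2 h3 <;>
    simp_all [bne_iff_ne] <;> tauto

lemma pvFindA_go (matched : PySem.Set Nat) (pt : String × String × String)
    (gts : List (Option (String × String × String))) :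
    ∀ (l : List (Option (String × String × String))) (i : Nat), l = gts.drop i →
    (pvFindA matched pt l i = none → ∀ x, i ≤ x → ¬ pvOkA gts matched pt x) ∧
    (∀ g, pvFindA matched pt l i = some g →
      i ≤ g ∧ pvOkA gts matched pt g ∧ ∀ x, i ≤ x → x < g → ¬ pvOkA gts matched pt x) := by
  intro l
  induction l with
  | nil =>
    intro i hl
    have hlen : gts.length ≤ i := by
      have := congrArg List.length hl
      simp at this; omega
    refine ⟨fun _ x hx hok => ?_, fun g hg => by simp [pvFindA] at hg⟩
    obtain ⟨⟨g, hg, _⟩, _⟩ := hok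
    obtain ⟨hlt, -⟩ := List.getElem?_eq_some_iff.mp hg
    omega
  | cons g rest ih =>
    intro i hl
    have hgi : gts[i]? = some g := by
      rw [← List.head?_drop, ← hl]; rfl
    have hrest : rest = gts.drop (i + 1) := by
      have : (gts.drop i).tail = gts.drop (i + 1) := by
        rw [List.tail_drop]
      rw [← this, ← hl]; rfl
    obtain ⟨ihn, ihs⟩ := ih (i + 1) hrest
    by_cases hcond : (!(PySem.Set.contains matched i) && pvRelMatch pt g) = true
    · have : pvFindA matched pt (g :: rest) i = some i := by
        simp only [pvFindA]; rw [if_pos hcond]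
      refine ⟨fun hnone => by rw [this] at hnone; exact absurd hnone (by simp), fun g' hg' => ?_⟩
      rw [this] at hg'
      obtain rfl : i = g' := by simpa using hg'
      simp only [Bool.and_eq_true, Bool.not_eq_true'] at hcond
      have hni : i ∉ matched := by
        intro hm
        rw [← PySem.Set.contains_iff, hcond.1] at hm
        cases hm
      exact ⟨le_refl _, ⟨⟨g, hgi, hcond.2⟩, hni⟩, fun x hx1 hx2 => by omega⟩
    · have hstep : pvFindA matched pt (g :: rest) i = pvFindA matched pt rest (i + 1) := by
        simp only [pvFindA]; rw [if_neg hcond]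
      have hnok : ¬ pvOkA gts matched pt i := by
        rintro ⟨⟨g2, hg2, hrel⟩, hnm⟩
        rw [hgi] at hg2
        obtain rfl : g2 = g := by simpa using hg2.symm
        apply hcond
        simp [hrel, hnm]
      refine ⟨fun hnone x hx => ?_, fun g' hg' => ?_⟩
      · rw [hstep] at hnone
        rcases Nat.eq_or_lt_of_le hx with h | h
        · rw [← h]; exact hnok
        · exact ihn hnone x h
      · rw [hstep] at hg'
        obtain ⟨h1, h2, h3⟩ := ihs g' hg'
        refine ⟨by omega, h2, fun x hx1 hx2 => ?_⟩
        rcases Nat.eq_or_lt_of_le hx1 with h | h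
        · rw [← h]; exact hnok
        · exact h3 x h hx2

lemma pvFindA_spec (matched : PySem.Set Nat) (pt : String × String × String)
    (gts : List (Option (String × String × String))) :
    (pvFindA matched pt gts 0 = none → ∀ x, ¬ pvOkA gts matched pt x) ∧
    (∀ g, pvFindA matched pt gts 0 = some g → pvOkA gts matched pt g ∧ ∀ x < g, ¬ pvOkA gts matched pt x) := by
  obtain ⟨h1, h2⟩ := pvFindA_go matched pt gts gts 0 (by simp)
  exact ⟨fun hn x => h1 hn x (Nat.zero_le x),
    fun g hg => ⟨(h2 g hg).2.1, fun x hx => (h2 g hg).2.2 x (Nat.zero_le x) hx⟩⟩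

-- B's candidate for bucket k
def pvCandB (gts : List (Option (String × String × String)))
    (cur : PySem.Dict (String × String × String) Nat) (k : String × String × String) : Option Nat :=
  (pvIdxs gts 0 k)[cur.getD k 0]?

def pvCombine (best : Option (Nat × (String × String × String))) (c : Option Nat)
    (k : String × String × String) : Option (Nat × (String × String × String)) :=
  match c with
  | none => best
  | some v =>
    match best with
    | none => some (v, k)
    | some (b, bk) => if v < b then some (v, k) else some (b, bk)

lemma pvStepB_eq (gt_invs : List (List (String × List (String × String))))
    (cur : PySem.Dict (String × String × String) Nat)
    (best : Option (Nat × (String × String × String))) (k : String × String × String) :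
    pvStepB (pvBucketsGo gt_invs 0 PySem.Dict.empty) cur best k =
      pvCombine best (pvCandB (gt_invs.map pvG) cur k) k := by
  have hbk : ∀ k', (pvBucketsGo gt_invs 0 PySem.Dict.empty).getD k' [] = pvIdxs (gt_invs.map pvG) 0 k' := by
    intro k'
    rw [pvBucketsGo_getD]
    simp [PySem.Dict.getD_empty]
  unfold pvStepB
  cases hg : (pvBucketsGo gt_invs 0 PySem.Dict.empty).get? k with
  | none =>
    have : pvIdxs (gt_invs.map pvG) 0 k = [] := by
      rw [← hbk k, PySem.Dict.getD_eq_get?_getD, hg]; rfl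
    simp [pvCandB, pvCombine, this]
  | some lst =>
    have hlst : lst = pvIdxs (gt_invs.map pvG) 0 k := by
      rw [← hbk k, PySem.Dict.getD_eq_get?_getD, hg]; rfl
    simp only [pvCandB, ← hlst]
    by_cases hc : cur.getD k 0 < lst.length
    · rw [if_pos hc]
      rw [PySem.List.pyGet?_natCast]
      cases hv : lst[cur.getD k 0]? with
      | none => rw [List.getElem?_eq_none_iff] at hv; omega
      | some v => simp [pvCombine]
    · rw [if_neg hc]
      have : lst[cur.getD k 0]? = none := by
        rw [List.getElem?_eq_none_iff]; omega
      simp [this, pvCombine]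

lemma pvFold_spec (gts : List (Option (String × String × String)))
    (buckets : PySem.Dict (String × String × String) (List Nat))
    (cur : PySem.Dict (String × String × String) Nat)
    (hstep : ∀ best k, pvStepB buckets cur best k = pvCombine best (pvCandB gts cur k) k) :
    ∀ (ks : List (String × String × String)) (best : Option (Nat × (String × String × String))),
    (∀ v k, best = some (v, k) → pvCandB gts cur k = some v) →
    (ks.foldl (pvStepB buckets cur) best = none → best = none ∧ ∀ k ∈ ks, pvCandB gts cur k = none) ∧
    (∀ v bk, ks.foldl (pvStepB buckets cur) best = some (v, bk) →
      pvCandB gts cur bk = some v ∧ (bk ∈ ks ∨ best = some (v, bk)) ∧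
      (∀ k ∈ ks, ∀ x, pvCandB gts cur k = some x → v ≤ x) ∧
      (∀ b0 k0, best = some (b0, k0) → v ≤ b0)) := by
  intro ks
  induction ks with
  | nil =>
    intro best hwf
    refine ⟨fun h => ⟨h, by simp⟩, fun v bk h => ?_⟩
    simp only [List.foldl_nil] at h
    exact ⟨hwf v bk h, Or.inr h, by simp, fun b0 k0 hb => by rw [h] at hb; simp_all⟩
  | cons k ks ih =>
    intro best hwf
    rw [List.foldl_cons]
    have hstepk := hstep best k
    set best' := pvStepB buckets cur best k with hbdef
    have hwf' : ∀ v k', best' = some (v, k') → pvCandB gts cur k' = some v := by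
      intro v k' h
      rw [hstepk] at h
      cases hc : pvCandB gts cur k with
      | none => rw [hc] at h; simp only [pvCombine] at h; exact hwf v k' h
      | some x =>
        rw [hc] at h
        cases hb : best with
        | none =>
          rw [hb] at h; simp only [pvCombine] at h
          obtain ⟨h1, h2⟩ : x = v ∧ k = k' := by simpa using h
          rw [← h1, ← h2]; exact hc
        | some p =>
          obtain ⟨b, bk0⟩ := p
          rw [hb] at h; simp only [pvCombine] at h
          by_cases hlt : x < b
          · rw [if_pos hlt] at h
            obtain ⟨h1, h2⟩ : x = v ∧ k = k' := by simpa using h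
            rw [← h1, ← h2]; exact hc
          · rw [if_neg hlt] at h
            obtain ⟨h1, h2⟩ : b = v ∧ bk0 = k' := by simpa using h
            rw [← h1, ← h2]; exact hwf b bk0 hb
    have hval : ∀ v k', best' = some (v, k') →
        (∀ x, pvCandB gts cur k = some x → v ≤ x) ∧
        (∀ b0 k0, best = some (b0, k0) → v ≤ b0) ∧
        (k' = k ∨ best = some (v, k')) := by
      intro v k' h
      rw [hstepk] at h
      cases hc : pvCandB gts cur k with
      | none =>
        rw [hc] at h; simp only [pvCombine] at h
        refine ⟨fun x hx => ?_, fun b0 k0 hb => ?_, Or.inr h⟩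
        · simp at hx
        · rw [h] at hb; simp at hb; omega
      | some x =>
        rw [hc] at h
        cases hb : best with
        | none =>
          rw [hb] at h; simp only [pvCombine] at h
          obtain ⟨h1, h2⟩ : x = v ∧ k = k' := by simpa using h
          refine ⟨fun x' hx' => ?_, by simp, Or.inl h2.symm⟩
          simp at hx'; omega
        | some p =>
          obtain ⟨b, bk0⟩ := p
          rw [hb] at h; simp only [pvCombine] at h
          by_cases hlt : x < b
          · rw [if_pos hlt] at h
            obtain ⟨h1, h2⟩ : x = v ∧ k = k' := by simpa using h
            refine ⟨fun x' hx' => ?_, fun b0 k0 hb0 => ?_, Or.inl h2.symm⟩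
            · simp at hx'; omega
            · simp at hb0; omega
          · rw [if_neg hlt] at h
            obtain ⟨h1, h2⟩ : b = v ∧ bk0 = k' := by simpa using h
            refine ⟨fun x' hx' => ?_, fun b0 k0 hb0 => ?_, Or.inr h⟩
            · simp at hx'; omega
            · simp at hb0; omega
    have hnone' : best' = none → pvCandB gts cur k = none ∧ best = none := by
      intro hb'
      rw [hstepk] at hb'
      cases hc : pvCandB gts cur k with
      | none => rw [hc] at hb'; simp only [pvCombine] at hb'; exact ⟨rfl, hb'⟩
      | some x =>
        rw [hc] at hb'
        cases hbb : best with
        | none => rw [hbb] at hb'; simp [pvCombine] at hb'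
        | some p =>
          obtain ⟨b, bk0⟩ := p
          rw [hbb] at hb'; simp only [pvCombine] at hb'
          split at hb' <;> simp at hb'
    obtain ⟨ihn, ihs⟩ := ih best' hwf'
    constructor
    · intro hnone
      obtain ⟨hb', hks⟩ := ihn hnone
      obtain ⟨hck, hbn⟩ := hnone' hb'
      refine ⟨hbn, fun k' hk' => ?_⟩
      rcases List.mem_cons.mp hk' with rfl | h
      · exact hck
      · exact hks k' h
    · intro v bk hres
      obtain ⟨hcbk, hmem, hmin, hbest'⟩ := ihs v bk hres
      refine ⟨hcbk, ?_, ?_, ?_⟩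
      · rcases hmem with h | h
        · exact Or.inl (List.mem_cons_of_mem k h)
        · rcases (hval v bk h).2.2 with h2 | h2
          · exact Or.inl (h2 ▸ List.mem_cons_self)
          · exact Or.inr h2
      · intro k' hk' x hx
        rcases List.mem_cons.mp hk' with rfl | h
        · cases hb' : best' with
          | none => rw [(hnone' hb').1] at hx; cases hx
          | some p =>
            obtain ⟨b0', k0'⟩ := p
            exact le_trans (hbest' b0' k0' hb') ((hval b0' k0' hb').1 x hx)
        · exact hmin k' h x hx
      · intro b0 k0 hb0
        cases hb' : best' with
        | none => rw [(hnone' hb').2] at hb0; cases hb0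
        | some p =>
          obtain ⟨b0', k0'⟩ := p
          exact le_trans (hbest' b0' k0' hb') ((hval b0' k0' hb').2.1 b0 k0 hb0)

-- under the invariant, okA x says exactly that x sits at-or-after the cursor of a candidate bucket
lemma pvOkA_iff (gts : List (Option (String × String × String))) (matched : PySem.Set Nat)
    (cur : PySem.Dict (String × String × String) Nat) (hinv : pvInv gts matched cur)
    (pt : String × String × String) (x : Nat) :
    pvOkA gts matched pt x ↔ ∃ k ∈ pvCands pt, x ∈ (pvIdxs gts 0 k).drop (cur.getD k 0) := by
  constructor
  · rintro ⟨⟨g, hg, hrel⟩, hnm⟩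
    cases g with
    | none => simp [pvRelMatch] at hrel
    | some kk =>
      have hk : kk ∈ pvCands pt := (pvRelMatch_iff_mem_cands pt kk).mp hrel
      have hmem : x ∈ pvIdxs gts 0 kk := (pvIdxs_mem_zero_iff gts kk).mpr hg
      refine ⟨kk, hk, ?_⟩
      rw [← List.take_append_drop (cur.getD kk 0) (pvIdxs gts 0 kk), List.mem_append] at hmem
      rcases hmem with h | h
      · exact absurd ((hinv kk).1 x h) hnm
      · exact h
  · rintro ⟨k, hk, hx⟩
    have hmem : x ∈ pvIdxs gts 0 k := List.mem_of_mem_drop hx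
    have hg : gts[x]? = some (some k) := (pvIdxs_mem_zero_iff gts k).mp hmem
    exact ⟨⟨some k, hg, (pvRelMatch_iff_mem_cands pt k).mpr hk⟩, (hinv k).2 x hx⟩

lemma pvCandB_head (gts : List (Option (String × String × String)))
    (cur : PySem.Dict (String × String × String) Nat) (k : String × String × String) :
    pvCandB gts cur k = ((pvIdxs gts 0 k).drop (cur.getD k 0)).head? := by
  simp [pvCandB, List.head?_drop]

lemma pvInv_preserve (gts : List (Option (String × String × String))) (matched : PySem.Set Nat)
    (cur : PySem.Dict (String × String × String) Nat) (hinv : pvInv gts matched cur)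
    (bk : String × String × String) (v : Nat)
    (hv : pvCandB gts cur bk = some v) :
    pvInv gts (PySem.Set.add matched v) (cur.insert bk (cur.getD bk 0 + 1)) := by
  obtain ⟨hlt, hv⟩ := List.getElem?_eq_some_iff.mp hv
  intro k
  rw [PySem.Dict.getD_insert]
  by_cases hk : k = bk
  · subst hk
    rw [if_pos rfl]
    constructor
    · intro x hx
      rw [List.take_add_one] at hx
      rcases List.mem_append.mp hx with h | h
      · exact (PySem.Set.mem_add matched v x).mpr (Or.inl ((hinv k).1 x h))
      · have : x = v := by
          rw [List.getElem?_eq_getElem hlt, hv] at h; simpa using h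
        exact (PySem.Set.mem_add matched v x).mpr (Or.inr this)
    · intro x hx hmem
      have hdrop : (pvIdxs gts 0 k).drop (cur.getD k 0) = v :: (pvIdxs gts 0 k).drop (cur.getD k 0 + 1) := by
        rw [List.drop_eq_getElem_cons hlt, hv]
      rcases (PySem.Set.mem_add matched v x).mp hmem with h | h
      · exact (hinv k).2 x (by rw [hdrop]; exact List.mem_cons_of_mem v hx) h
      · subst h
        have hpw : ((pvIdxs gts 0 k).drop (cur.getD k 0)).Pairwise (· < ·) :=
          (pvIdxs_sorted gts 0 k).drop
        rw [hdrop] at hpw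
        have := (List.pairwise_cons.mp hpw).1 x hx
        omega
  · rw [if_neg hk]
    constructor
    · intro x hx
      exact (PySem.Set.mem_add matched v x).mpr (Or.inl ((hinv k).1 x hx))
    · intro x hx hmem
      rcases (PySem.Set.mem_add matched v x).mp hmem with h | h
      · exact (hinv k).2 x hx h
      · subst h
        have h1 : x ∈ pvIdxs gts 0 k := List.mem_of_mem_drop hx
        have h2 : x ∈ pvIdxs gts 0 bk := by
          rw [← hv]; exact List.getElem_mem hlt
        rw [pvIdxs_mem_zero_iff] at h1 h2
        rw [h1] at h2
        exact hk (by simpa using h2)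

lemma pvStep_main (gt_invs : List (List (String × List (String × String))))
    (matched : PySem.Set Nat) (cur : PySem.Dict (String × String × String) Nat)
    (hinv : pvInv (gt_invs.map pvG) matched cur) (pt : String × String × String) :
    ((pvCands pt).foldl (pvStepB (pvBucketsGo gt_invs 0 PySem.Dict.empty) cur) none = none ∧
      pvFindA matched pt (gt_invs.map pvG) 0 = none) ∨
    (∃ v bk, (pvCands pt).foldl (pvStepB (pvBucketsGo gt_invs 0 PySem.Dict.empty) cur) none = some (v, bk) ∧
      pvFindA matched pt (gt_invs.map pvG) 0 = some v ∧
      pvCandB (gt_invs.map pvG) cur bk = some v) := by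
  set gts := gt_invs.map pvG with hgts
  have hfold := pvFold_spec gts (pvBucketsGo gt_invs 0 PySem.Dict.empty) cur
    (fun best k => pvStepB_eq gt_invs cur best k) (pvCands pt) none (by simp)
  have hfa := pvFindA_spec matched pt gts
  -- a member of a dropped bucket is at least the bucket's cursor element
  have hdropmin : ∀ k g, g ∈ (pvIdxs gts 0 k).drop (cur.getD k 0) →
      ∃ h0, pvCandB gts cur k = some h0 ∧ h0 ≤ g := by
    intro k g hg
    cases hh : ((pvIdxs gts 0 k).drop (cur.getD k 0)).head? with
    | none =>
      rw [List.head?_eq_none_iff] at hh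
      rw [hh] at hg; cases hg
    | some h0 =>
      refine ⟨h0, by rw [pvCandB_head, hh], ?_⟩
      obtain ⟨tl, htl⟩ := List.head?_eq_some_iff.mp hh
      rw [htl] at hg
      have hpw : ((pvIdxs gts 0 k).drop (cur.getD k 0)).Pairwise (· < ·) :=
        (pvIdxs_sorted gts 0 k).drop
      rw [htl] at hpw
      rcases List.mem_cons.mp hg with rfl | h
      · exact le_refl _
      · exact Nat.le_of_lt ((List.pairwise_cons.mp hpw).1 g h)
  cases hres : (pvCands pt).foldl (pvStepB (pvBucketsGo gt_invs 0 PySem.Dict.empty) cur) none with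
  | none =>
    left
    refine ⟨rfl, ?_⟩
    cases hf : pvFindA matched pt gts 0 with
    | none => rfl
    | some g =>
      exfalso
      obtain ⟨hok, -⟩ := hfa.2 g hf
      obtain ⟨k, hk, hgd⟩ := (pvOkA_iff gts matched cur hinv pt g).mp hok
      obtain ⟨h0, hc0, -⟩ := hdropmin k g hgd
      rw [(hfold.1 hres).2 k hk] at hc0
      cases hc0
  | some p =>
    obtain ⟨v, bk⟩ := p
    right
    obtain ⟨hcbk, hmemk, hmin, -⟩ := hfold.2 v bk hres
    have hbkmem : bk ∈ pvCands pt := by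
      rcases hmemk with h | h
      · exact h
      · cases h
    have hvdrop : v ∈ (pvIdxs gts 0 bk).drop (cur.getD bk 0) := by
      obtain ⟨hlt, hv⟩ := List.getElem?_eq_some_iff.mp hcbk
      rw [List.drop_eq_getElem_cons hlt, hv]
      exact List.mem_cons_self
    have hokv : pvOkA gts matched pt v :=
      (pvOkA_iff gts matched cur hinv pt v).mpr ⟨bk, hbkmem, hvdrop⟩
    cases hf : pvFindA matched pt gts 0 with
    | none => exact absurd hokv (hfa.1 hf v)
    | some g =>
      obtain ⟨hokg, hming⟩ := hfa.2 g hf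
      obtain ⟨k, hk, hgd⟩ := (pvOkA_iff gts matched cur hinv pt g).mp hokg
      obtain ⟨h0, hc0, hh0⟩ := hdropmin k g hgd
      have hvle : v ≤ g := le_trans (hmin k hk h0 hc0) hh0
      have hgle : g ≤ v := by
        by_contra hlt
        exact hming v (by omega) hokv
      obtain rfl : v = g := by omega
      exact ⟨v, bk, rfl, rfl, hcbk⟩

lemma pvLoop_eq (gt_invs : List (List (String × List (String × String)))) :
    ∀ (preds : List (List (String × List (String × String)))) (matched : PySem.Set Nat)
      (cur : PySem.Dict (String × String × String) Nat) (acc),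
    pvInv (gt_invs.map pvG) matched cur →
    pvLoopA gt_invs (gt_invs.map pvG) preds matched acc =
      pvLoopB gt_invs (pvBucketsGo gt_invs 0 PySem.Dict.empty) preds cur acc := by
  intro preds
  induction preds with
  | nil => intro matched cur acc _; rfl
  | cons pred rest ih =>
    intro matched cur acc hinv
    simp only [pvLoopA, pvLoopB]
    cases hst : (PySem.Dict.mk pred).get? "structured" with
    | none => exact ih matched cur _ hinv
    | some st =>
      dsimp only
      rcases pvStep_main gt_invs matched cur hinv (pvNorm3 st) with
        ⟨hfold, hfa⟩ | ⟨v, bk, hfold, hfa, hcbk⟩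
      · rw [hfold, hfa]
        exact ih matched cur _ hinv
      · rw [hfold, hfa]
        exact ih _ _ _ (pvInv_preserve (gt_invs.map pvG) matched cur hinv bk v hcbk)

-- ===== VERDICT (by name: the statement is the Claim_ definition above) =====
theorem match_invariants_relaxed_py_spec : Claim_equal_match_invariants_relaxed_py := by
  intro pred_invs gt_invs _
  unfold Spec_match_invariants_relaxed_py match_invariants_relaxed_py match_invariants_relaxed_py_alt
  rw [PySem.List.foldl_append_singleton_eq_map]
  simp only [List.nil_append]
  exact pvLoop_eq gt_invs pred_invs PySem.Set.empty PySem.Dict.empty []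
    (by intro k; constructor <;> simp [PySem.Dict.getD_empty, PySem.Set.empty])
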